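-- pv_equiv track=rewrite | github.com/Abay-Wizard/Strivers-A2Z-DSA-Sheet | 02.Binary Search/2D Arrays/5.Matrix_median.py | matrix_median
-- ===== SOURCE A (Python) =====
-- def matrix_median(matrix):
--     final_list=[]
--     n,m=len(matrix),len(matrix[0])
--     for i in range(n):
--         for j in range(m):
--             final_list.append(matrix[i][j])
--     final_list.sort()
--     return final_list[m*n//2]
-- ===== SOURCE B (Python) =====
-- def matrix_median(matrix):
--     # quickselect on the flattened matrix: no full sort
--     xs = [x for row in matrix for x in row]
--     k = len(xs) // 2
--     while True:
--         p = xs[0]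
--         lt = [x for x in xs if x < p]
--         if k < len(lt):
--             xs = lt
--             continue
--         k -= len(lt)
--         eq = xs.count(p)
--         if k < eq:
--             return p
--         k -= eq
--         xs = [x for x in xs if x > p]
-- ===== Notes on version B (the rewrite author's own statement) =====
-- stated objective: faster
-- what changed: B replaces flatten-then-full-sort-then-index with a quickselect (partition around the first element, recurse into the side holding index n*m//2), so no sort is performed.
-- outside the precondition, e.g. on matrix_median([[5], [1, 2]]): A returns 5, B returns 2
import Mathlib
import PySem

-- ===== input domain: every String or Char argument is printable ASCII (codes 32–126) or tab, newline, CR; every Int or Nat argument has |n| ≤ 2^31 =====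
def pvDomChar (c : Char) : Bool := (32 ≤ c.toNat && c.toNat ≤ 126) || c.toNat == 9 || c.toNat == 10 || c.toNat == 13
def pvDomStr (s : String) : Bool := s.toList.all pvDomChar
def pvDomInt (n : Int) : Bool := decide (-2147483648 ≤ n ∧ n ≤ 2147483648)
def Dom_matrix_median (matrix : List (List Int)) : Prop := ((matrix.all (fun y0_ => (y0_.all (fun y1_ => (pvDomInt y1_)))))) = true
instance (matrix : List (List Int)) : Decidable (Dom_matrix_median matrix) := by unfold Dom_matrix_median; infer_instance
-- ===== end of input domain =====

-- B computes the median by quickselect on the flattened matrix instead of A's full sort; measurably different algorithm (claimed faster).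


-- ===== PORT A =====
def matrix_median (matrix : List (List Int)) : Int :=
  let n : Int := matrix.length
  let m : Int := (PySem.List.pyGetD matrix 0 []).length
  let final_list : List Int :=
    (PySem.List.pyRange 0 n 1).foldl (fun acc i =>
      (PySem.List.pyRange 0 m 1).foldl (fun acc2 j =>
        acc2 ++ [PySem.List.pyGetD (PySem.List.pyGetD matrix i []) j 0]) acc) []
  let final_sorted := PySem.List.sorted final_list (fun x => x) false
  PySem.List.pyGetD final_sorted (PySem.Int.floordiv (m * n) 2) 0

-- ===== PORT B =====
-- the 'while True' selection loop of Source B, as a recursion on the shrinking list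
def quickselect (k : Int) (xs : List Int) : Int :=
  match xs with
  | [] => 0  -- unreachable under Pre_ (Source B's xs[0] would raise here)
  | p :: rest =>
    let lt := (p :: rest).filter (fun x => decide (x < p))
    if k < (lt.length : Int) then quickselect k lt
    else
      let k1 := k - (lt.length : Int)
      let eq : Int := (List.count p (p :: rest) : Int)
      if k1 < eq then p
      else quickselect (k1 - eq) ((p :: rest).filter (fun x => decide (p < x)))
termination_by xs.length
decreasing_by
  · exact List.length_filter_lt_length_iff_exists.2 ⟨p, by simp, by simp⟩
  · exact List.length_filter_lt_length_iff_exists.2 ⟨p, by simp, by simp⟩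

def matrix_median_alt (matrix : List (List Int)) : Int :=
  let xs := matrix.flatten
  quickselect (PySem.Int.floordiv (xs.length : Int) 2) xs

-- ===== PRECONDITION & SPEC =====
-- Pre_ restricts to nonempty rectangular matrices with at least one column (the natural domain of a
-- matrix function): on ragged or empty inputs A either raises IndexError or silently truncates each
-- row to the first row's length, an artefact B does not reproduce.
def Pre_matrix_median (matrix : List (List Int)) : Prop :=
  matrix ≠ [] ∧ 0 < matrix.headI.length ∧ ∀ row ∈ matrix, row.length = matrix.headI.length
instance (matrix : List (List Int)) : Decidable (Pre_matrix_median matrix) := by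
  unfold Pre_matrix_median; infer_instance

def pvWitness_matrix_median : List (List Int) := [[3, 1], [2, 4]]

def Spec_matrix_median (matrix : List (List Int)) (out : Int) : Prop := out = matrix_median_alt matrix
instance (matrix : List (List Int)) (out : Int) : Decidable (Spec_matrix_median matrix out) := by unfold Spec_matrix_median; infer_instance

-- ===== CLAIM (what is proved, stated in full; the proofs are below) =====
def Claim_equal_matrix_median : Prop := ∀ (matrix : List (List Int)), Dom_matrix_median matrix → Pre_matrix_median matrix → Spec_matrix_median matrix (matrix_median matrix)

-- ===== LEMMAS AND PROOFS =====

-- A's inner index loop appends exactly the row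
lemma inner_loop_eq (row : List Int) (n : Nat) (hn : n ≤ row.length) (acc : List Int) :
    (List.range n).foldl (fun a (j : Nat) => a ++ [PySem.List.pyGetD row (j : Int) 0]) acc
      = acc ++ row.take n := by
  induction n generalizing acc with
  | zero => simp
  | succ n ih =>
    rw [List.range_succ, List.foldl_append]
    rw [ih (by omega)]
    have hget : PySem.List.pyGetD row ((n : Nat) : Int) 0 = row[n] := by
      rw [PySem.List.pyGetD_natCast]; exact List.getD_eq_getElem _ _ (by omega)
    simp only [List.foldl_cons, List.foldl_nil]
    rw [hget, List.take_add_one, List.getElem?_eq_getElem (show n < row.length by omega)]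
    simp

-- A's double index loop builds exactly the flatten of the matrix (rectangular case)
lemma flatten_loop_eq (matrix : List (List Int)) (m0 : Nat)
    (hm : ∀ row ∈ matrix, row.length = m0) (n : Nat) (hn : n ≤ matrix.length) (acc : List Int) :
    (List.range n).foldl (fun a (i : Nat) =>
       (List.range m0).foldl
         (fun a2 (j : Nat) => a2 ++ [PySem.List.pyGetD (PySem.List.pyGetD matrix (i : Int) []) (j : Int) 0]) a) acc
      = acc ++ (matrix.take n).flatten := by
  induction n generalizing acc with
  | zero => simp
  | succ n ih =>
    rw [List.range_succ, List.foldl_append, ih (by omega)]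
    simp only [List.foldl_cons, List.foldl_nil]
    have hrow : PySem.List.pyGetD matrix ((n : Nat) : Int) [] = matrix[n] := by
      rw [PySem.List.pyGetD_natCast]; exact List.getD_eq_getElem _ _ (by omega)
    rw [hrow]
    have hlen : matrix[n].length = m0 := hm _ (List.getElem_mem _)
    have := inner_loop_eq matrix[n] m0 (by omega) (acc ++ (List.take n matrix).flatten)
    rw [this, List.take_of_length_le (le_of_eq hlen)]
    rw [show List.take (n + 1) matrix = List.take n matrix ++ [matrix[n]] by
      rw [List.take_add_one, List.getElem?_eq_getElem (show n < matrix.length by omega)]; rfl]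
    simp only [List.flatten_append, List.flatten_cons, List.flatten_nil, List.append_nil,
      List.append_assoc]

-- sorted xs splits at a pivot into sorted-smaller ++ copies of the pivot ++ sorted-larger
lemma sorted_partition (p : Int) (xs : List Int) :
    PySem.List.sorted xs (fun x => x) false =
      PySem.List.sorted (xs.filter (fun x => decide (x < p))) (fun x => x) false
        ++ (List.replicate (List.count p xs) p
        ++ PySem.List.sorted (xs.filter (fun x => decide (p < x))) (fun x => x) false) := by
  have hp1 := PySem.List.sorted_perm (xs.filter (fun x => decide (x < p))) (fun x : Int => x) false
  have hp2 := PySem.List.sorted_perm (xs.filter (fun x => decide (p < x))) (fun x : Int => x) false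
  apply PySem.List.sorted_id_eq_of_perm_of_pairwise
  · rw [List.perm_iff_count]
    intro a
    simp only [List.count_append, hp1.count_eq, hp2.count_eq, List.count_replicate]
    have c1 : ¬ a < p → List.count a (List.filter (fun x => decide (x < p)) xs) = 0 :=
      fun h => List.count_eq_zero.2 (fun hmem => by
        have := (List.mem_filter.1 hmem).2; simp at this; omega)
    have c2 : ¬ p < a → List.count a (List.filter (fun x => decide (p < x)) xs) = 0 :=
      fun h => List.count_eq_zero.2 (fun hmem => by
        have := (List.mem_filter.1 hmem).2; simp at this; omega)
    rcases lt_trichotomy a p with h | h | h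
    · simp [h, c2 (by omega), show ¬ p = a by omega]
    · subst h; simp [c1 (by omega), c2 (by omega)]
    · simp [h, c1 (by omega), show ¬ p = a by omega]
  · rw [List.pairwise_append]
    refine ⟨PySem.List.sorted_pairwise _ _, ?_, ?_⟩
    · rw [List.pairwise_append]
      refine ⟨?_, PySem.List.sorted_pairwise _ _, ?_⟩
      · exact List.pairwise_replicate.2 (Or.inr (le_refl p))
      · intro b hb c hc
        have hbp := List.eq_of_mem_replicate hb
        have hcg : c ∈ xs.filter (fun x => decide (p < x)) := (PySem.List.mem_sorted _ _ _ _).1 hc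
        have := (List.mem_filter.1 hcg).2
        subst hbp; simp at this; omega
    · intro a ha b hb
      have hal : a ∈ xs.filter (fun x => decide (x < p)) := (PySem.List.mem_sorted _ _ _ _).1 ha
      have hap := (List.mem_filter.1 hal).2
      simp at hap
      rcases List.mem_append.1 hb with hb | hb
      · have := List.eq_of_mem_replicate hb; subst this; omega
      · have hbg : b ∈ xs.filter (fun x => decide (p < x)) := (PySem.List.mem_sorted _ _ _ _).1 hb
        have := (List.mem_filter.1 hbg).2
        simp at this; omega

lemma pyGetD_append_left' (a b : List Int) (k : Int) (d : Int) (h0 : 0 ≤ k) (hk : k < (a.length : Int)) :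
    PySem.List.pyGetD (a ++ b) k d = PySem.List.pyGetD a k d := by
  rw [PySem.List.pyGetD_eq_getElem _ _ h0 (by simp; omega), PySem.List.pyGetD_eq_getElem _ _ h0 (by omega)]
  exact List.getElem_append_left (by omega)

lemma pyGetD_append_right' (a b : List Int) (k : Int) (d : Int) (hk : (a.length : Int) ≤ k)
    (hk2 : k < (a.length : Int) + (b.length : Int)) :
    PySem.List.pyGetD (a ++ b) k d = PySem.List.pyGetD b (k - a.length) d := by
  rw [PySem.List.pyGetD_eq_getElem _ _ (by omega) (by simp; omega),
    PySem.List.pyGetD_eq_getElem _ _ (by omega) (by omega)]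
  rw [List.getElem_append_right (by omega)]
  congr 1
  omega

-- quickselect picks the k-th element of the sorted list
lemma quickselect_eq (N : Nat) (xs : List Int) (hN : xs.length ≤ N) (k : Int)
    (h0 : 0 ≤ k) (hk : k < (xs.length : Int)) :
    quickselect k xs = PySem.List.pyGetD (PySem.List.sorted xs (fun x => x) false) k 0 := by
  induction N generalizing xs k with
  | zero =>
    exfalso
    have : xs.length = 0 := by omega
    omega
  | succ N ih =>
    match xs with
    | [] => exfalso; simp at hk; omega
    | p :: rest =>
      have hsplit := sorted_partition p (p :: rest)
      have e0 := ((PySem.List.sorted_perm (p :: rest) (fun x : Int => x) false).length_eq)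
      have e1 := ((PySem.List.sorted_perm ((p :: rest).filter (fun x => decide (x < p))) (fun x : Int => x) false).length_eq)
      have e2 := ((PySem.List.sorted_perm ((p :: rest).filter (fun x => decide (p < x))) (fun x : Int => x) false).length_eq)
      have hlen : ((p :: rest).filter (fun x => decide (x < p))).length
          + List.count p (p :: rest)
          + ((p :: rest).filter (fun x => decide (p < x))).length = (p :: rest).length := by
        rw [hsplit] at e0
        simp only [List.length_append, List.length_replicate] at e0
        omega
      have hltlen : ((p :: rest).filter (fun x => decide (x < p))).length < (p :: rest).length :=
        List.length_filter_lt_length_iff_exists.2 ⟨p, by simp, by simp⟩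
      have hgtlen : ((p :: rest).filter (fun x => decide (p < x))).length < (p :: rest).length :=
        List.length_filter_lt_length_iff_exists.2 ⟨p, by simp, by simp⟩
      rw [quickselect]
      simp only []
      split_ifs with h1 h2
      · rw [ih _ (by omega) k h0 (by omega), hsplit,
          pyGetD_append_left' _ _ _ _ h0 (by omega)]
      · rw [hsplit, pyGetD_append_right' _ _ _ _ (by omega) (by simp only [List.length_append, List.length_replicate]; omega),
          pyGetD_append_left' _ _ _ _ (by omega) (by simp only [List.length_replicate]; omega)]
        rw [PySem.List.pyGetD_eq_getElem _ _ (by omega) (by simp only [List.length_replicate]; omega)]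
        rw [List.getElem_replicate]
      · rw [ih _ (by omega) _ (by omega) (by omega), hsplit,
          pyGetD_append_right' _ _ _ _ (by omega) (by simp only [List.length_append, List.length_replicate]; omega),
          pyGetD_append_right' _ _ _ _ (by simp only [List.length_replicate]; omega) (by simp only [List.length_replicate]; omega)]
        congr 1
        simp only [List.length_replicate]
        omega

theorem matrix_median_spec : Claim_equal_matrix_median := by
  intro matrix _hdom hpre
  obtain ⟨hne, hpos, hrect⟩ := hpre
  unfold Spec_matrix_median
  rcases matrix with _ | ⟨r0, tl⟩
  · exact absurd rfl hne
  simp only [List.headI] at hpos hrect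
  have hL : (r0 :: tl).flatten.length = (r0 :: tl).length * r0.length := by
    have hmap : (r0 :: tl).map List.length = List.replicate (r0 :: tl).length r0.length := by
      rw [show (r0 :: tl).length = (List.map List.length (r0 :: tl)).length by simp]
      apply List.eq_replicate_of_mem
      intro b hb
      rcases List.mem_map.1 hb with ⟨row, hrow, hrfl⟩
      rw [← hrfl]; exact hrect row hrow
    rw [List.length_flatten, hmap, List.sum_replicate, smul_eq_mul]
  have hflat : (PySem.List.pyRange 0 ((r0 :: tl).length : Int)).foldl
      (fun acc i => (PySem.List.pyRange 0 (((PySem.List.pyGetD (r0 :: tl) 0 []).length : Nat) : Int)).foldl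
        (fun acc2 j => acc2 ++ [PySem.List.pyGetD (PySem.List.pyGetD (r0 :: tl) i []) j 0]) acc) []
      = (r0 :: tl).flatten := by
    rw [PySem.List.pyGetD_zero_cons]
    simp only [PySem.List.pyRange_zero_nat, List.foldl_map]
    rw [flatten_loop_eq (r0 :: tl) r0.length hrect (r0 :: tl).length le_rfl []]
    simp [List.take_length]
  unfold matrix_median matrix_median_alt
  simp only [PySem.List.pyGetD_zero_cons]
  rw [show (PySem.List.pyRange 0 ((r0 :: tl).length : Int)).foldl
      (fun acc i => (PySem.List.pyRange 0 ((r0.length : Nat) : Int)).foldl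
        (fun acc2 j => acc2 ++ [PySem.List.pyGetD (PySem.List.pyGetD (r0 :: tl) i []) j 0]) acc) []
      = (r0 :: tl).flatten from by
    simpa [PySem.List.pyGetD_zero_cons] using hflat]
  have hidx : PySem.Int.floordiv ((r0.length : Int) * ((r0 :: tl).length : Int)) 2
      = PySem.Int.floordiv (((r0 :: tl).flatten.length : Nat) : Int) 2 := by
    rw [hL]
    congr 1
    push_cast
    ring
  rw [hidx]
  rw [show PySem.Int.floordiv ((((r0 :: tl).flatten.length : Nat)) : Int) 2
      = (((r0 :: tl).flatten.length / 2 : Nat) : Int) by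
    exact_mod_cast PySem.Int.floordiv_natCast ((r0 :: tl).flatten.length) 2]
  have hpos' : 0 < (r0 :: tl).flatten.length := by
    rw [hL]; simp; positivity
  rw [quickselect_eq ((r0 :: tl).flatten.length) _ le_rfl _ (by positivity)
    (by exact_mod_cast Nat.div_lt_self hpos' (by omega))]

-- ===== VERDICT (by name: the statement is the Claim_ definition above) =====
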